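-- pv_equiv track=rewrite | github.com/Terristwj/IS111-Intro-to-Programming | IS111 - Introduction to Programming G2/My codes/IS111/Lab Test 2/Lab Test 2 (AY2020-21 T1)/your_email_id/q2.py | get_hi_lo
-- ===== SOURCE A (Python) =====
-- def get_hi_lo(products):
--     # Write your code here.
--     hi_lo = (None, None)
--     if products:
--         if len(products) != 1:
--             highest_prod = (products[0][0], products[0][1])
--             smallest_prod = (products[0][0], products[0][1])
--
--             for i in range(1, len(products)):
--                 if products[i][1] > highest_prod[1]:
--                     highest_prod = (products[i][0], products[i][1])
--                 elif products[i][1] < smallest_prod[1]: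
--                     smallest_prod = (products[i][0], products[i][1])
--             hi_lo = (highest_prod[0], smallest_prod[0])
--         else:
--             hi_lo = (products[0][0], products[0][0])
--     return hi_lo
-- ===== SOURCE B (Python) =====
-- def get_hi_lo(products):
--     if not products:
--         return (None, None)
--     hi = max(products, key=lambda p: p[1])
--     lo = min(products, key=lambda p: p[1])
--     return (hi[0], lo[0])
-- ===== Notes on version B (the rewrite author's own statement) =====
-- stated objective: idiomatic
-- what changed: Replaces the interleaved manual hi/lo tracking loop (with its index-based range scan and length-1 special case) by two independent builtin max/min extremum passes keyed on price; first-extremum tie behaviour matches A's strict comparisons.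
import Mathlib
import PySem

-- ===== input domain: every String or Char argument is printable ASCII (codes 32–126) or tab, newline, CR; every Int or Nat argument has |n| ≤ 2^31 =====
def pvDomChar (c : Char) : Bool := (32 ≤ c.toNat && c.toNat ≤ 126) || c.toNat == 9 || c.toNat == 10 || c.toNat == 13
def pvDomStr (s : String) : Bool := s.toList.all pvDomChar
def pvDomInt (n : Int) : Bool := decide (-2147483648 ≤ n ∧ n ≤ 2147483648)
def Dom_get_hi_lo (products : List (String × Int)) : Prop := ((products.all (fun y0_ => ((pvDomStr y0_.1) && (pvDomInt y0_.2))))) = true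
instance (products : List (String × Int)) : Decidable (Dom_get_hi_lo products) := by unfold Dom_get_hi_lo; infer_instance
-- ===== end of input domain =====

-- B replaces A's single interleaved hi/lo tracking loop (index scan + length-1 special case)
-- by two independent builtin max/min extremum passes keyed on price (objective: idiomatic).


-- ===== PORT A =====
def get_hi_lo (products : List (String × Int)) : Option String × Option String :=
  let hi_lo : Option String × Option String := (none, none)
  if products ≠ [] then
    if products.length ≠ 1 then
      let p0 := PySem.List.pyGetD products 0 ("", 0)
      let highest_prod : String × Int := (p0.1, p0.2)
      let smallest_prod : String × Int := (p0.1, p0.2)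
      let res := (PySem.List.pyRange 1 (PySem.List.len products) 1).foldl
        (fun (st : (String × Int) × (String × Int)) i =>
          let x := PySem.List.pyGetD products i ("", 0)
          if x.2 > st.1.2 then ((x.1, x.2), st.2)
          else if x.2 < st.2.2 then (st.1, (x.1, x.2))
          else st)
        (highest_prod, smallest_prod)
      (some res.1.1, some res.2.1)
    else
      let p0 := PySem.List.pyGetD products 0 ("", 0)
      (some p0.1, some p0.1)
  else hi_lo

-- ===== PORT B =====
def get_hi_lo_alt (products : List (String × Int)) : Option String × Option String :=
  if products = [] then (none, none)
  else
    -- max()/min() on a nonempty list always return; the none branch is unreachable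
    match PySem.List.max? products (fun p => p.2), PySem.List.min? products (fun p => p.2) with
    | some hi, some lo => (some hi.1, some lo.1)
    | _, _ => (none, none)

-- ===== PRECONDITION & SPEC =====
def Spec_get_hi_lo (products : List (String × Int)) (out : Option String × Option String) : Prop := out = get_hi_lo_alt products
instance (products : List (String × Int)) (out : Option String × Option String) : Decidable (Spec_get_hi_lo products out) := by unfold Spec_get_hi_lo; infer_instance

-- ===== CLAIM (what is proved, stated in full; the proofs are below) =====
def Claim_equal_get_hi_lo : Prop := ∀ (products : List (String × Int)), Dom_get_hi_lo products → Spec_get_hi_lo products (get_hi_lo products)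

-- ===== LEMMAS AND PROOFS =====

-- max? on a nonempty list is the plain running-max fold started at the head
theorem pv_max?_cons (p : String × Int) (rest : List (String × Int)) :
    PySem.List.max? (p :: rest) (fun q => q.2)
      = some (rest.foldl (fun m x => if m.2 < x.2 then x else m) p) := by
  induction rest generalizing p with
  | nil => rfl
  | cons y t ih =>
      simp only [PySem.List.max?, List.foldl] at *
      rw [← apply_ite some]
      exact ih _

theorem pv_min?_cons (p : String × Int) (rest : List (String × Int)) :
    PySem.List.min? (p :: rest) (fun q => q.2)
      = some (rest.foldl (fun m x => if x.2 < m.2 then x else m) p) := by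
  induction rest generalizing p with
  | nil => rfl
  | cons y t ih =>
      simp only [PySem.List.min?, List.foldl] at *
      rw [← apply_ite some]
      exact ih _

-- A's interleaved loop is the pair of independent extremum folds, given lo ≤ hi
theorem pv_loop_eq (rest : List (String × Int)) (hi lo : String × Int) (h : lo.2 ≤ hi.2) :
    rest.foldl
      (fun (st : (String × Int) × (String × Int)) (x : String × Int) =>
        if x.2 > st.1.2 then ((x.1, x.2), st.2)
        else if x.2 < st.2.2 then (st.1, (x.1, x.2))
        else st)
      (hi, lo)
      = (rest.foldl (fun m x => if m.2 < x.2 then x else m) hi,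
         rest.foldl (fun m x => if x.2 < m.2 then x else m) lo) := by
  induction rest generalizing hi lo with
  | nil => rfl
  | cons y t ih =>
      simp only [List.foldl]
      by_cases h1 : hi.2 < y.2
      · have : ¬ y.2 < lo.2 := by omega
        simp only [gt_iff_lt, h1, if_pos, this, if_neg, if_false]
        exact ih _ _ (by omega)
      · by_cases h2 : y.2 < lo.2
        · simp only [gt_iff_lt, h1, if_neg, h2, if_pos, if_false]
          exact ih _ _ (by omega)
        · simp only [gt_iff_lt, h1, h2, if_neg, if_false]
          exact ih _ _ h

-- ===== VERDICT (by name: the statement is the Claim_ definition above) =====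
theorem get_hi_lo_spec : Claim_equal_get_hi_lo := by
  intro products _
  show get_hi_lo products = get_hi_lo_alt products
  match products with
  | [] => rfl
  | [p] => simp [get_hi_lo, get_hi_lo_alt, pv_max?_cons, pv_min?_cons]
  | p :: q :: rest =>
      unfold get_hi_lo get_hi_lo_alt
      simp only [ne_eq, reduceCtorEq, not_false_iff, if_true, List.length_cons]
      rw [show PySem.List.pyGetD (p :: q :: rest) 0 ("", 0) = p by simp [pysem]]
      rw [PySem.List.foldl_pyRange_pyGetD (p :: q :: rest) ("", 0)
          (fun (st : (String × Int) × (String × Int)) (x : String × Int) =>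
            if x.2 > st.1.2 then ((x.1, x.2), st.2)
            else if x.2 < st.2.2 then (st.1, (x.1, x.2))
            else st)
          ((p.1, p.2), (p.1, p.2)) (by norm_num)]
      rw [pv_loop_eq _ _ _ (le_refl _)]
      rw [pv_max?_cons, pv_min?_cons]
      simp [List.foldl]
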